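-- pv_equiv track=rewrite | github.com/SquirtlesAlgorithmStudy/SquirtlesAlgorithmStudy-Hard | 의진/소프티어/루돌프월드컵.py | is_number_1_win
-- ===== SOURCE A (Python) =====
-- def calculate_score(scores, win_or_draw, left, right):
--     if win_or_draw == "left_win":
--         scores[left][0] += 3
--     elif win_or_draw == "right_win":
--         scores[right][0] += 3
--     else:
--         scores[left][0] += 1
--         scores[right][0] += 1
--
-- def is_number_1_win(case):
--     scores = [[0, i] for i in range(5)]
--     for c, item in zip(case, [(1, 2), (1, 3), (1, 4), (2, 3), (2, 4), (3, 4)]):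
--         if c == 1:
--             calculate_score(scores, "left_win", item[0], item[1])
--         elif c == 0:
--             calculate_score(scores, "draw", item[0], item[1])
--         else:
--             calculate_score(scores, "right_win", item[0], item[1])
--     scores.sort(key=lambda x: (-x[0], x[1]))
--
--     for s in scores[:2]:
--         if s[1] == 1:
--             return True
--     return False
-- ===== SOURCE B (Python) =====
-- def is_number_1_win(case):
--     score = [0] * 5
--     games = [(1, 2), (1, 3), (1, 4), (2, 3), (2, 4), (3, 4)]
--     for c, (l, r) in zip(case, games):
--         if c == 1:
--             score[l] += 3
--         elif c == 0:
--             score[l] += 1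
--             score[r] += 1
--         else:
--             score[r] += 3
--     ahead = sum(
--         1
--         for p in range(5)
--         if p != 1 and (score[p] > score[1] or (score[p] == score[1] and p < 1))
--     )
--     return ahead < 2
-- ===== Notes on version B (the rewrite author's own statement) =====
-- stated objective: simpler
-- what changed: B replaces the sort of the five (score, index) pairs and the top-2 slice scan by a direct rank computation: it counts the players that order strictly ahead of player 1 under the same (-score, index) tie-break and returns whether that count is below 2.
import Mathlib
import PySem

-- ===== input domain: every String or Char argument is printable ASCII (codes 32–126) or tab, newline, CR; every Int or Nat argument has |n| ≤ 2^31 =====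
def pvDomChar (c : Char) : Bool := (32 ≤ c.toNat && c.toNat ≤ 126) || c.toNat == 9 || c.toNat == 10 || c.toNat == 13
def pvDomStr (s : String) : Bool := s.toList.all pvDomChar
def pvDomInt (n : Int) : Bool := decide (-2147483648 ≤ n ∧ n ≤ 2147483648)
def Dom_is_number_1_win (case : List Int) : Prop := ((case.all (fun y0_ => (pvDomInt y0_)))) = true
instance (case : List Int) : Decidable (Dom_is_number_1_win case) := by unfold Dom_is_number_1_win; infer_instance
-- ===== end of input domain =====

-- B replaces A's sort of the (score, index) pairs + top-2 slice scan by a direct counting of the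
-- players ranked ahead of player 1 under the same (-score, index) order; same return value everywhere.

-- ===== PORT A =====
-- scores[i][0] += d : read scores[i], write back with first component increased (index always in range here)
def pvAddA (scores : List (Int × Int)) (i d : Int) : List (Int × Int) :=
  match PySem.List.pyGet? scores i with
  | some p => PySem.List.pySetD scores i (p.1 + d, p.2)
  | none => scores

def calculate_score (scores : List (Int × Int)) (win_or_draw : String) (left right : Int) :
    List (Int × Int) :=
  if win_or_draw == "left_win" then pvAddA scores left 3
  else if win_or_draw == "right_win" then pvAddA scores right 3
  else pvAddA (pvAddA scores left 1) right 1

-- the body of A's for-loop over zip(case, games)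
def pvStepA (sc : List (Int × Int)) (ci : Int × (Int × Int)) : List (Int × Int) :=
  if ci.1 == 1 then calculate_score sc "left_win" ci.2.1 ci.2.2
  else if ci.1 == 0 then calculate_score sc "draw" ci.2.1 ci.2.2
  else calculate_score sc "right_win" ci.2.1 ci.2.2

def pvGames : List (Int × Int) := [(1, 2), (1, 3), (1, 4), (2, 3), (2, 4), (3, 4)]

def is_number_1_win (case : List Int) : Bool :=
  let scores0 : List (Int × Int) := (PySem.List.pyRange 0 5 1).map (fun i => ((0 : Int), i))
  let scores := (case.zip pvGames).foldl pvStepA scores0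
  -- sort(key=lambda x: (-x[0], x[1])): Python tuple comparison on ints is exactly the
  -- lexicographic order, i.e. '<' on Lex (Int × Int) via toLex
  let sorted := PySem.List.sorted scores (fun x => toLex (-x.1, x.2)) false
  -- the for-loop over scores[:2] with early 'return True' and final 'return False'
  (PySem.List.slice sorted none (some 2)).any (fun s => s.2 == 1)

-- ===== PORT B =====
-- score[i] += d (index always in range here)
def pvAddB (score : List Int) (i d : Int) : List Int :=
  match PySem.List.pyGet? score i with
  | some v => PySem.List.pySetD score i (v + d)
  | none => score

-- the body of B's for-loop over zip(case, games)
def pvStepB (sc : List Int) (cg : Int × (Int × Int)) : List Int :=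
  if cg.1 == 1 then pvAddB sc cg.2.1 3
  else if cg.1 == 0 then pvAddB (pvAddB sc cg.2.1 1) cg.2.2 1
  else pvAddB sc cg.2.2 3

def is_number_1_win_alt (case : List Int) : Bool :=
  let score := (case.zip pvGames).foldl pvStepB (List.replicate 5 (0 : Int))
  let s1 := PySem.List.pyGetD score 1 0
  -- sum(1 for p in range(5) if p != 1 and (score[p] > score[1] or (score[p] == score[1] and p < 1)))
  let ahead : Int := (((PySem.List.pyRange 0 5 1).filter
      (fun p => decide (p ≠ 1) &&
        (decide (PySem.List.pyGetD score p 0 > s1) ||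
         (decide (PySem.List.pyGetD score p 0 = s1) && decide (p < 1))))).map
      (fun _ => (1 : Int))).sum
  decide (ahead < 2)

-- ===== PRECONDITION & SPEC =====
def Spec_is_number_1_win (case : List Int) (out : Bool) : Prop := out = is_number_1_win_alt case
instance (case : List Int) (out : Bool) : Decidable (Spec_is_number_1_win case out) := by unfold Spec_is_number_1_win; infer_instance

-- ===== CLAIM (what is proved, stated in full; the proofs are below) =====
def Claim_equal_is_number_1_win : Prop := ∀ (case : List Int), Dom_is_number_1_win case → Spec_is_number_1_win case (is_number_1_win case)

-- ===== LEMMAS AND PROOFS =====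

lemma pv_fold_rel : ∀ (L : List (Int × (Int × Int))), (∀ p ∈ L, p.2 ∈ pvGames) →
    ∀ s0 s1 s2 s3 s4 : Int,
    ∃ t0 t1 t2 t3 t4 : Int,
      L.foldl pvStepA [(s0,0),(s1,1),(s2,2),(s3,3),(s4,4)] = [(t0,0),(t1,1),(t2,2),(t3,3),(t4,4)] ∧
      L.foldl pvStepB [s0,s1,s2,s3,s4] = [t0,t1,t2,t3,t4] := by
  intro L
  induction L with
  | nil => exact fun _ s0 s1 s2 s3 s4 => ⟨s0,s1,s2,s3,s4, rfl, rfl⟩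
  | cons p L ih =>
    intro h s0 s1 s2 s3 s4
    have hp : p.2 ∈ pvGames := h p (List.mem_cons_self ..)
    have hrest : ∀ q ∈ L, q.2 ∈ pvGames := fun q hq => h q (List.mem_cons_of_mem _ hq)
    obtain ⟨c, lr⟩ := p
    simp only [pvGames, List.mem_cons, List.not_mem_nil, or_false] at hp
    by_cases hc1 : c = 1
    · subst hc1
      rcases hp with rfl|rfl|rfl|rfl|rfl|rfl
      · simpa using ih hrest s0 (s1+3) s2 s3 s4
      · simpa using ih hrest s0 (s1+3) s2 s3 s4
      · simpa using ih hrest s0 (s1+3) s2 s3 s4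
      · simpa using ih hrest s0 s1 (s2+3) s3 s4
      · simpa using ih hrest s0 s1 (s2+3) s3 s4
      · simpa using ih hrest s0 s1 s2 (s3+3) s4
    · have e1 : (c == 1) = false := by simpa using hc1
      by_cases hc0 : c = 0
      · subst hc0
        rcases hp with rfl|rfl|rfl|rfl|rfl|rfl
        · simpa using ih hrest s0 (s1+1) (s2+1) s3 s4
        · simpa using ih hrest s0 (s1+1) s2 (s3+1) s4
        · simpa using ih hrest s0 (s1+1) s2 s3 (s4+1)
        · simpa using ih hrest s0 s1 (s2+1) (s3+1) s4
        · simpa using ih hrest s0 s1 (s2+1) s3 (s4+1)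
        · simpa using ih hrest s0 s1 s2 (s3+1) (s4+1)
      · have e0 : (c == 0) = false := by simpa using hc0
        rcases hp with rfl|rfl|rfl|rfl|rfl|rfl
        · simpa [pvStepA, pvStepB, e1, e0] using ih hrest s0 s1 (s2+3) s3 s4
        · simpa [pvStepA, pvStepB, e1, e0] using ih hrest s0 s1 s2 (s3+3) s4
        · simpa [pvStepA, pvStepB, e1, e0] using ih hrest s0 s1 s2 s3 (s4+3)
        · simpa [pvStepA, pvStepB, e1, e0] using ih hrest s0 s1 s2 (s3+3) s4
        · simpa [pvStepA, pvStepB, e1, e0] using ih hrest s0 s1 s2 s3 (s4+3)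
        · simpa [pvStepA, pvStepB, e1, e0] using ih hrest s0 s1 s2 s3 (s4+3)

lemma pv_mem_take_iff {α κ : Type} [LinearOrder κ] (K : α → κ) :
    ∀ (ys : List α), ys.Pairwise (fun a b => K a < K b) → ∀ e, e ∈ ys → ∀ n : Nat,
      (e ∈ ys.take n ↔ ys.countP (fun x => decide (K x < K e)) < n) := by
  intro ys
  induction ys with
  | nil => simp
  | cons y t ih =>
    intro hpw e he n
    have hy : ∀ x ∈ t, K y < K x := (List.pairwise_cons.mp hpw).1
    have ht : t.Pairwise (fun a b => K a < K b) := (List.pairwise_cons.mp hpw).2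
    rcases List.mem_cons.mp he with rfl | het
    · have hz : t.countP (fun x => decide (K x < K e)) = 0 := by
        rw [List.countP_eq_zero]
        intro x hx
        simpa using not_lt_of_gt (hy x hx)
      cases n with
      | zero => simp
      | succ n =>
        simp [hz]
    · have hKy : K y < K e := hy e het
      cases n with
      | zero => simp
      | succ n =>
        have hne : e ≠ y := fun h => absurd hKy (by simp [h])
        simp only [List.take_succ_cons, List.mem_cons, List.countP_cons, hKy, decide_true,
          hne, false_or]
        rw [ih ht e het n]
        norm_num

lemma pv_top2_count {α κ : Type} [LinearOrder κ] (K : α → κ) (hinj : Function.Injective K)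
    (xs : List α) (hnd : xs.Nodup) (e : α) (he : e ∈ xs) (n : Nat) :
    e ∈ (PySem.List.sorted xs K false).take n ↔
      xs.countP (fun x => decide (K x < K e)) < n := by
  have h1 : (PySem.List.sorted xs K false).Pairwise (fun a b => K a ≤ K b) :=
    PySem.List.sorted_pairwise xs K
  have h2 : (PySem.List.sorted xs K false).Nodup :=
    ((PySem.List.sorted_perm xs K false).nodup_iff).mpr hnd
  have hpw : (PySem.List.sorted xs K false).Pairwise (fun a b => K a < K b) :=
    (h1.and h2).imp (fun h => lt_of_le_of_ne h.1 (fun he' => h.2 (hinj he')))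
  have hes : e ∈ PySem.List.sorted xs K false := (PySem.List.mem_sorted _ _ _ _).mpr he
  rw [pv_mem_take_iff K _ hpw e hes n, (PySem.List.sorted_perm xs K false).countP_eq]

lemma pv_final (t0 t1 t2 t3 t4 : Int) :
    (PySem.List.slice (PySem.List.sorted ([(t0,0),(t1,1),(t2,2),(t3,3),(t4,4)] : List (Int × Int))
        (fun x => toLex (-x.1, x.2)) false) none (some 2)).any (fun s => s.2 == 1)
    = decide (((((PySem.List.pyRange 0 5 1).filter
        (fun p => decide (p ≠ 1) &&
          (decide (PySem.List.pyGetD [t0,t1,t2,t3,t4] p 0 > PySem.List.pyGetD [t0,t1,t2,t3,t4] 1 0) ||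
           (decide (PySem.List.pyGetD [t0,t1,t2,t3,t4] p 0 = PySem.List.pyGetD [t0,t1,t2,t3,t4] 1 0) &&
            decide (p < 1))))).map (fun _ => (1 : Int))).sum) < 2) := by
  have hinj : Function.Injective (fun x : Int × Int => toLex (-x.1, x.2)) := by
    rintro ⟨a1,a2⟩ ⟨b1,b2⟩ h
    simp only [toLex_inj, Prod.mk.injEq] at h
    simp only [Prod.mk.injEq]
    omega
  have h2 := pv_top2_count (fun x : Int × Int => toLex (-x.1, x.2)) hinj
      [(t0,0),(t1,1),(t2,2),(t3,3),(t4,4)] (by simp) (t1,1) (by simp) 2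
  have harith :
      ([(t0,0),(t1,1),(t2,2),(t3,3),(t4,4)].countP
          (fun x : Int × Int => decide ((fun x : Int × Int => toLex (-x.1, x.2)) x
            < (fun x : Int × Int => toLex (-x.1, x.2)) (t1,1))) < 2) ↔
      ((((PySem.List.pyRange 0 5 1).filter
        (fun p => decide (p ≠ 1) &&
          (decide (PySem.List.pyGetD [t0,t1,t2,t3,t4] p 0 > PySem.List.pyGetD [t0,t1,t2,t3,t4] 1 0) ||
           (decide (PySem.List.pyGetD [t0,t1,t2,t3,t4] p 0 = PySem.List.pyGetD [t0,t1,t2,t3,t4] 1 0) &&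
            decide (p < 1))))).map (fun _ => (1 : Int))).sum) < 2 := by
    have hr : PySem.List.pyRange 0 5 1 = [0,1,2,3,4] := rfl
    have g0 : PySem.List.pyGetD [t0,t1,t2,t3,t4] (0:Int) 0 = t0 := rfl
    have g1 : PySem.List.pyGetD [t0,t1,t2,t3,t4] (1:Int) 0 = t1 := rfl
    have g2 : PySem.List.pyGetD [t0,t1,t2,t3,t4] (2:Int) 0 = t2 := rfl
    have g3 : PySem.List.pyGetD [t0,t1,t2,t3,t4] (3:Int) 0 = t3 := rfl
    have g4 : PySem.List.pyGetD [t0,t1,t2,t3,t4] (4:Int) 0 = t4 := rfl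
    rw [hr]
    simp only [List.filter_cons, List.filter_nil, g0, g1, g2, g3, g4,
      List.countP_cons, List.countP_nil, Prod.Lex.lt_iff]
    norm_num
    split_ifs <;> simp_all
  rw [PySem.List.slice_to _ (by norm_num)]
  rw [Bool.eq_iff_iff]
  simp only [List.any_eq_true, beq_iff_eq, decide_eq_true_eq]
  constructor
  · rintro ⟨x, hx, hx2⟩
    have hxs : x ∈ ([(t0,0),(t1,1),(t2,2),(t3,3),(t4,4)] : List (Int × Int)) :=
      (PySem.List.mem_sorted _ _ _ _).mp (List.mem_of_mem_take hx)
    have hxe : x = ((t1, 1) : Int × Int) := by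
      simp only [List.mem_cons, List.not_mem_nil, or_false] at hxs
      rcases hxs with rfl|rfl|rfl|rfl|rfl <;> simp_all
    exact harith.mp (h2.mp (by rwa [hxe] at hx))
  · intro hs
    exact ⟨((t1,1) : Int × Int), h2.mpr (harith.mpr hs), rfl⟩


-- ===== VERDICT (by name: the statement is the Claim_ definition above) =====
theorem is_number_1_win_spec : Claim_equal_is_number_1_win := by
  intro case _
  unfold Spec_is_number_1_win is_number_1_win is_number_1_win_alt
  obtain ⟨t0, t1, t2, t3, t4, hA, hB⟩ := pv_fold_rel (case.zip pvGames)
      (fun p hp => (List.of_mem_zip hp).2) 0 0 0 0 0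
  simp only [show ((PySem.List.pyRange 0 5 1).map (fun i => ((0 : Int), i)))
        = ([(0,0),(0,1),(0,2),(0,3),(0,4)] : List (Int × Int)) from rfl,
      show List.replicate 5 (0 : Int) = [0,0,0,0,0] from rfl, hA, hB]
  exact pv_final t0 t1 t2 t3 t4
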